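-- pv_equiv track=rewrite | github.com/ShihaoTan123/ner-industry | scripts/02_prepare_scienceie.py | spans_to_bio
-- ===== SOURCE A (Python) =====
-- def spans_to_bio(tokens, offsets, spans):
--     labs = ["O"] * len(tokens)
--     for s_char, e_char, typ in spans:
--         covered = [i for i, (s, e) in enumerate(offsets) if not (e <= s_char or e_char <= s)]
--         if not covered:
--             continue
--         labs[covered[0]] = f"B-{typ}"
--         for i in covered[1:]:
--             labs[i] = f"I-{typ}"
--     return labs
-- ===== SOURCE B (Python) =====
-- def spans_to_bio(tokens, offsets, spans):
--     # Token-major single pass: for each token (in order) find its label from the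
--     # last overlapping span; a 'seen' set of span indices tells B- from I-.
--     n = len(tokens)
--     seen = set()
--     out = []
--     for s, e in offsets[:n]:
--         lab = "O"
--         for j, (s_char, e_char, typ) in enumerate(spans):
--             if e > s_char and e_char > s:
--                 lab = ("I-" if j in seen else "B-") + typ
--                 seen.add(j)
--         out.append(lab)
--     out.extend(["O"] * (n - len(out)))
--     return out
-- ===== Notes on version B (the rewrite author's own statement) =====
-- stated objective: alternative
-- what changed: B replaces A's span-major loop that mutates a label array (writing B-/I- per span, later spans overwriting earlier ones) with a single token-major pass that derives each token's label from the last overlapping span and a 'seen span indices' set distinguishing B- from I-.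
import Mathlib
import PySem

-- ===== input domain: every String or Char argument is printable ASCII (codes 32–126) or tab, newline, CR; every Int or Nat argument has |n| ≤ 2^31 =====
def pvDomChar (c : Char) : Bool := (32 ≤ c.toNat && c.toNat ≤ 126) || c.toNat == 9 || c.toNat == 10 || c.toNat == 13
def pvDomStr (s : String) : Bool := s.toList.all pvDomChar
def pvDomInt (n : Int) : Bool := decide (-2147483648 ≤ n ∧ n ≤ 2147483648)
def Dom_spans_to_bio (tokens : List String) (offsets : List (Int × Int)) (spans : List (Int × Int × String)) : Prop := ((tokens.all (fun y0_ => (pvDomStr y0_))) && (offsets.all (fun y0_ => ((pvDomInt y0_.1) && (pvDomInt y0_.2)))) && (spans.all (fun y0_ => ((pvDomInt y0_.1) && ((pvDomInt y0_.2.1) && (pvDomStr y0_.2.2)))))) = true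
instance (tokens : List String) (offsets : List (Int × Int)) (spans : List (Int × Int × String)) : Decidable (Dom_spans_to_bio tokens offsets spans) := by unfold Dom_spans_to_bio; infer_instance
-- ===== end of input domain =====

-- B re-implements the span-major, label-array-mutating loop of A as a single token-major
-- pass with a 'seen spans' set (same O(n·m) cost, different structure: no label overwrites).

-- ===== PORT A =====
-- covered = [i for i, (s, e) in enumerate(offsets) if not (e <= s_char or e_char <= s)]
def pvA_cov (offsets : List (Int × Int)) (sp : Int × Int × String) : List Int :=
  ((PySem.List.enumerate offsets).filter
    (fun p => !(decide (p.2.2 ≤ sp.1) || decide (sp.2.1 ≤ p.2.1)))).map (fun p => p.1)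

-- one iteration of A's outer loop body (labs[covered[0]] = B-, labs[i] = I- for covered[1:])
def pvA_step (offsets : List (Int × Int)) (labs : List String) (sp : Int × Int × String) : List String :=
  match pvA_cov offsets sp with
  | [] => labs
  | c0 :: rest =>
    rest.foldl (fun l i => PySem.List.pySetD l i ("I-" ++ sp.2.2))
      (PySem.List.pySetD labs c0 ("B-" ++ sp.2.2))

def spans_to_bio (tokens : List String) (offsets : List (Int × Int)) (spans : List (Int × Int × String)) : List String :=
  spans.foldl (pvA_step offsets) (List.replicate tokens.length "O")

-- ===== PORT B =====
-- inner loop of B: for j, (s_char, e_char, typ) in enumerate(spans): …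
def pvB_inner (o : Int × Int) (q : String × PySem.Set Int) (jsp : Int × (Int × Int × String)) : String × PySem.Set Int :=
  if decide (jsp.2.1 < o.2) && decide (o.1 < jsp.2.2.1) then
    ((if PySem.Set.contains q.2 jsp.1 then "I-" else "B-") ++ jsp.2.2.2, PySem.Set.add q.2 jsp.1)
  else q

-- outer loop body of B: compute this token's label, thread 'seen', append the label
def pvB_step (spans : List (Int × Int × String)) (st : PySem.Set Int × List String) (o : Int × Int) : PySem.Set Int × List String :=
  let p := (PySem.List.enumerate spans).foldl (pvB_inner o) ("O", st.1)
  (p.2, st.2 ++ [p.1])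

def spans_to_bio_alt (tokens : List String) (offsets : List (Int × Int)) (spans : List (Int × Int × String)) : List String :=
  let n := tokens.length
  let r := (PySem.List.slice offsets none (some (n : Int))).foldl (pvB_step spans) (PySem.Set.empty, [])
  r.2 ++ List.replicate (n - r.2.length) "O"

-- ===== PRECONDITION & SPEC =====
-- Pre_ excludes exactly the inputs where Python A raises IndexError: an offset entry at
-- position ≥ len(tokens) that overlaps some span makes A assign labs[i] out of range.
def Pre_spans_to_bio (tokens : List String) (offsets : List (Int × Int)) (spans : List (Int × Int × String)) : Prop :=
  ∀ k < offsets.length, tokens.length ≤ k →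
    ∀ sp ∈ spans, ((offsets.getD k (0, 0)).2 ≤ sp.1 ∨ sp.2.1 ≤ (offsets.getD k (0, 0)).1)
instance (tokens : List String) (offsets : List (Int × Int)) (spans : List (Int × Int × String)) : Decidable (Pre_spans_to_bio tokens offsets spans) := by unfold Pre_spans_to_bio; infer_instance

def pvWitness_spans_to_bio : List String × (List (Int × Int)) × (List (Int × Int × String)) :=
  (["Foo", "bar"], [(0, 3), (4, 7)], [(4, 7, "Task"), (0, 2, "Material")])

def Spec_spans_to_bio (tokens : List String) (offsets : List (Int × Int)) (spans : List (Int × Int × String)) (out : List String) : Prop := out = spans_to_bio_alt tokens offsets spans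
instance (tokens : List String) (offsets : List (Int × Int)) (spans : List (Int × Int × String)) (out : List String) : Decidable (Spec_spans_to_bio tokens offsets spans out) := by unfold Spec_spans_to_bio; infer_instance

-- ===== CLAIM (what is proved, stated in full; the proofs are below) =====
def Claim_equal_spans_to_bio : Prop := ∀ (tokens : List String) (offsets : List (Int × Int)) (spans : List (Int × Int × String)), Dom_spans_to_bio tokens offsets spans → Pre_spans_to_bio tokens offsets spans → Spec_spans_to_bio tokens offsets spans (spans_to_bio tokens offsets spans)

-- ===== LEMMAS AND PROOFS =====

-- the overlap test, shared by the specification layer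
def pvOvl (o : Int × Int) (sp : Int × Int × String) : Bool :=
  decide (sp.1 < o.2) && decide (o.1 < sp.2.1)

-- intended label of a token with offset o, given the offsets 'pre' of the tokens before it
def labAt (pre : List (Int × Int)) (o : Int × Int) (spans : List (Int × Int × String)) : String :=
  spans.foldl
    (fun acc sp => if pvOvl o sp then
        ((if pre.all (fun o' => !pvOvl o' sp) then "B-" else "I-") ++ sp.2.2)
      else acc) "O"

theorem bool_ext {a b : Bool} (h : a = true ↔ b = true) : a = b := by
  cases a <;> cases b <;> simp_all

theorem foldl_congr_mem'' {α β : Type} {l : List α} {f g : β → α → β}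
    (h : ∀ x ∈ l, ∀ acc, f acc x = g acc x) : ∀ init, l.foldl f init = l.foldl g init := by
  induction l with
  | nil => intro init; rfl
  | cons x xs ih =>
    intro init
    simp only [List.foldl_cons]
    rw [h x (List.mem_cons_self ..)]
    exact ih (fun y hy acc => h y (List.mem_cons_of_mem _ hy) acc) _

-- ---------- A-side lemmas ----------

theorem pvFilt_eq (sp : Int × Int × String) (p : Int × (Int × Int)) :
    (!(decide (p.2.2 ≤ sp.1) || decide (sp.2.1 ≤ p.2.1))) = pvOvl p.2 sp := by
  simp only [pvOvl, Bool.not_or, ← decide_not, not_le]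

theorem mem_pvA_cov (offsets : List (Int × Int)) (sp : Int × Int × String) (x : Int) :
    x ∈ pvA_cov offsets sp ↔
      ∃ (k : Nat) (_ : k < offsets.length), x = (k : Int) ∧ pvOvl offsets[k] sp = true := by
  unfold pvA_cov
  simp only [List.mem_map, List.mem_filter, PySem.List.mem_enumerate_iff]
  constructor
  · rintro ⟨p, ⟨⟨k, hk, rfl⟩, hf⟩, rfl⟩
    rw [pvFilt_eq] at hf
    exact ⟨k, hk, by simp, hf⟩
  · rintro ⟨k, hk, rfl, hov⟩
    refine ⟨((0 : Int) + k, offsets[k]), ⟨⟨k, hk, rfl⟩, ?_⟩, by simp⟩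
    rw [pvFilt_eq]; exact hov

theorem pairwise_pvA_cov (offsets : List (Int × Int)) (sp : Int × Int × String) :
    (pvA_cov offsets sp).Pairwise (· < ·) := by
  unfold pvA_cov
  exact List.Pairwise.map _ (fun a b h => h)
    (List.Pairwise.filter _ (PySem.List.pairwise_lt_enumerate ..))

theorem length_foldl_pySetD (is : List Int) (L : List String) (v : String) :
    (is.foldl (fun l k => PySem.List.pySetD l k v) L).length = L.length := by
  induction is generalizing L with
  | nil => rfl
  | cons a as ih => simp only [List.foldl_cons]; rw [ih, PySem.List.length_pySetD]

theorem foldl_pySetD_getElem? (is : List Int) (L : List String) (v : String) (i : Nat)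
    (h0 : ∀ x ∈ is, 0 ≤ x) :
    (is.foldl (fun l k => PySem.List.pySetD l k v) L)[i]? =
      if (i : Int) ∈ is ∧ i < L.length then some v else L[i]? := by
  induction is generalizing L with
  | nil => simp
  | cons a as ih =>
    have ha : 0 ≤ a := h0 a (List.mem_cons_self ..)
    simp only [List.foldl_cons]
    rw [ih _ (fun x hx => h0 x (List.mem_cons_of_mem _ hx))]
    rw [PySem.List.pySetD_of_nonneg _ _ ha, List.length_set]
    by_cases hmem : (i : Int) ∈ as
    · by_cases hlen : i < L.length
      · rw [if_pos ⟨hmem, hlen⟩, if_pos ⟨List.mem_cons_of_mem _ hmem, hlen⟩]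
      · have h1 : (L.set a.toNat v)[i]? = none := by
          rw [List.getElem?_eq_none_iff, List.length_set]; omega
        have h2 : L[i]? = none := by rw [List.getElem?_eq_none_iff]; omega
        rw [if_neg (fun h => hlen h.2), if_neg (fun h => hlen h.2), h1, h2]
    · by_cases hai : a = (i : Int)
      · have hnat : a.toNat = i := by omega
        by_cases hlen : i < L.length
        · rw [if_neg (fun h => hmem h.1), hnat, List.getElem?_set_self hlen,
            if_pos ⟨List.mem_cons.2 (Or.inl hai.symm), hlen⟩]
        · have h1 : (L.set a.toNat v)[i]? = none := by
            rw [List.getElem?_eq_none_iff, List.length_set]; omega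
          have h2 : L[i]? = none := by rw [List.getElem?_eq_none_iff]; omega
          rw [if_neg (fun h => hmem h.1), if_neg (fun h => hlen h.2), h1, h2]
      · have hne : a.toNat ≠ i := by omega
        rw [if_neg (fun h => hmem h.1), List.getElem?_set_ne hne,
          if_neg (fun h => by
            rcases List.mem_cons.1 h.1 with h' | h'
            · exact hai h'.symm
            · exact hmem h')]

theorem length_pvA_step (offsets : List (Int × Int)) (L : List String) (sp : Int × Int × String) :
    (pvA_step offsets L sp).length = L.length := by
  unfold pvA_step
  rcases pvA_cov offsets sp with _ | ⟨c0, rest⟩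
  · rfl
  · rw [length_foldl_pySetD, PySem.List.length_pySetD]

theorem length_foldl_A (offsets : List (Int × Int)) (spans : List (Int × Int × String))
    (L : List String) : (spans.foldl (pvA_step offsets) L).length = L.length := by
  induction spans generalizing L with
  | nil => rfl
  | cons sp sps ih => simp only [List.foldl_cons]; rw [ih, length_pvA_step]

theorem pvA_step_getElem? (offsets : List (Int × Int)) (sp : Int × Int × String)
    (L : List String) (i : Nat) (hiL : i < L.length) :
    (pvA_step offsets L sp)[i]? =
      if (offsets[i]?.any (fun o' => pvOvl o' sp)) then
        some ((if (offsets.take i).all (fun o' => !pvOvl o' sp) then "B-" else "I-") ++ sp.2.2)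
      else L[i]? := by
  have hmem := mem_pvA_cov offsets sp
  have hpw := pairwise_pvA_cov offsets sp
  unfold pvA_step
  rcases hcov : pvA_cov offsets sp with _ | ⟨c0, rest⟩
  · have hany : offsets[i]?.any (fun o' => pvOvl o' sp) = false := by
      cases ho : offsets[i]? with
      | none => rfl
      | some o =>
        rcases List.getElem?_eq_some_iff.1 ho with ⟨hio, rfl⟩
        simp only [Option.any_some]
        by_contra hov
        have h1 : (i : Int) ∈ pvA_cov offsets sp :=
          (hmem _).2 ⟨i, hio, rfl, by simpa using hov⟩
        simp [hcov] at h1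
    rw [hany]; simp
  · rw [hcov] at hmem hpw
    have h0 : ∀ x ∈ c0 :: rest, 0 ≤ x := by
      intro x hx
      rcases (hmem x).1 hx with ⟨k, hk, rfl, _⟩
      positivity
    have hc0 := h0 c0 (List.mem_cons_self ..)
    have hrlt : ∀ x ∈ rest, c0 < x := fun x hx => (List.pairwise_cons.1 hpw).1 x hx
    rcases (hmem c0).1 (List.mem_cons_self ..) with ⟨k0, hk0, hc0k, hov0⟩
    rw [foldl_pySetD_getElem? rest _ _ i (fun x hx => h0 x (List.mem_cons_of_mem _ hx))]
    rw [PySem.List.pySetD_of_nonneg _ _ hc0, List.length_set]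
    cases ho : offsets[i]? with
    | none =>
      have hio : offsets.length ≤ i := List.getElem?_eq_none_iff.1 ho
      have hni : (i : Int) ∉ c0 :: rest := by
        intro hx
        rcases (hmem _).1 hx with ⟨k, hk, hki, _⟩
        omega
      have hnr : (i : Int) ∉ rest := fun h => hni (List.mem_cons_of_mem _ h)
      have hnc : c0.toNat ≠ i := by
        intro h
        exact hni (by rw [List.mem_cons]; left; omega)
      simp only [Option.any_none]
      rw [if_neg Bool.false_ne_true, if_neg (fun h => hnr h.1), List.getElem?_set_ne hnc]
    | some o =>
      rcases List.getElem?_eq_some_iff.1 ho with ⟨hio, rfl⟩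
      simp only [Option.any_some]
      by_cases hov : pvOvl offsets[i] sp = true
      case neg =>
        have hni : (i : Int) ∉ c0 :: rest := by
          intro hx
          rcases (hmem _).1 hx with ⟨k, hk, hki, hovk⟩
          have hik : i = k := by omega
          subst hik
          exact hov hovk
        have hnr : (i : Int) ∉ rest := fun h => hni (List.mem_cons_of_mem _ h)
        have hnc : c0.toNat ≠ i := by
          intro h
          exact hni (by rw [List.mem_cons]; left; omega)
        rw [if_neg hov, if_neg (fun h => hnr h.1), List.getElem?_set_ne hnc]
      case pos =>
        have hic : (i : Int) ∈ c0 :: rest := (hmem _).2 ⟨i, hio, rfl, hov⟩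
        rw [if_pos hov]
        by_cases hfresh : ((offsets.take i).all (fun o' => !pvOvl o' sp)) = true
        case pos =>
          -- no earlier token overlaps, so i is the first covered index: i = c0, i ∉ rest
          have hall : ∀ (k : Nat) (hkl : k < offsets.length), k < i → pvOvl offsets[k] sp = false := by
            intro k hkl hki
            have hmemk : offsets[k] ∈ offsets.take i := by
              have hkt : k < (offsets.take i).length := by
                rw [List.length_take]; omega
              have := List.getElem_mem hkt
              rwa [List.getElem_take] at this
            have := List.all_eq_true.1 hfresh _ hmemk
            simpa using this
          have hieq : (i : Int) = c0 := by
            rcases List.mem_cons.1 hic with h | h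
            · exact h
            · exfalso
              have hlt : c0 < (i : Int) := hrlt _ h
              have hk0i : k0 < i := by omega
              rw [hall k0 hk0 hk0i] at hov0
              exact absurd hov0 (by simp)
          have hnr : (i : Int) ∉ rest := by
            intro h
            have := hrlt _ h
            omega
          have hci : c0.toNat = i := by omega
          rw [if_pos hfresh, if_neg (fun h => hnr h.1), hci,
            List.getElem?_set_self hiL]
        case neg =>
          -- some earlier token overlaps: i is not the first covered index, so i ∈ rest
          have hex : ∃ (k : Nat) (hkl : k < offsets.length), k < i ∧ pvOvl offsets[k] sp = true := by
            have hfresh' : ((offsets.take i).all (fun o' => !pvOvl o' sp)) = false := by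
              revert hfresh; cases (offsets.take i).all (fun o' => !pvOvl o' sp) <;> simp
            have := List.all_eq_false.1 hfresh'
            rcases this with ⟨x, hx, hpx⟩
            rcases List.mem_iff_getElem.1 hx with ⟨k, hk, rfl⟩
            have hkl : k < (offsets.take i).length := hk
            rw [List.length_take] at hkl
            refine ⟨k, by omega, by omega, ?_⟩
            rw [List.getElem_take] at hpx
            simpa using hpx
          rcases hex with ⟨k, hkl, hki, hovk⟩
          have hkc : (k : Int) ∈ c0 :: rest := (hmem _).2 ⟨k, hkl, rfl, hovk⟩
          have hir : (i : Int) ∈ rest := by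
            rcases List.mem_cons.1 hic with h | h
            · exfalso
              rcases List.mem_cons.1 hkc with h2 | h2
              · omega
              · have := hrlt _ h2; omega
            · exact h
          rw [if_neg hfresh, if_pos ⟨hir, hiL⟩]

theorem labAt_append (pre : List (Int × Int)) (o : Int × Int)
    (spans : List (Int × Int × String)) (sp : Int × Int × String) :
    labAt pre o (spans ++ [sp]) =
      if pvOvl o sp then
        ((if pre.all (fun o' => !pvOvl o' sp) then "B-" else "I-") ++ sp.2.2)
      else labAt pre o spans := by
  unfold labAt
  rw [List.foldl_append, List.foldl_cons, List.foldl_nil]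

theorem length_A (tokens : List String) (offsets : List (Int × Int)) (spans : List (Int × Int × String)) :
    (spans_to_bio tokens offsets spans).length = tokens.length := by
  unfold spans_to_bio
  rw [length_foldl_A, List.length_replicate]

theorem getElem?_A (tokens : List String) (offsets : List (Int × Int)) (spans : List (Int × Int × String))
    (i : Nat) (hi : i < tokens.length) :
    (spans_to_bio tokens offsets spans)[i]? =
      some ((offsets[i]?).elim "O" (fun o => labAt (offsets.take i) o spans)) := by
  unfold spans_to_bio
  induction spans using List.reverseRecOn with
  | nil =>
    cases ho : offsets[i]? <;> simp [labAt, hi]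
  | append_singleton spans sp ih =>
    rw [List.foldl_append, List.foldl_cons, List.foldl_nil]
    rw [pvA_step_getElem? offsets sp _ i (by rw [length_foldl_A, List.length_replicate]; exact hi)]
    cases ho : offsets[i]? with
    | none =>
      simp only [Option.any_none, Bool.false_eq_true, if_false]
      rw [ih]
      simp [ho]
    | some o =>
      simp only [Option.any_some, Option.elim_some]
      rw [labAt_append]
      by_cases hov : pvOvl o sp = true
      · rw [if_pos hov, if_pos hov]
      · rw [if_neg hov, if_neg hov, ih]
        simp [ho]

-- ---------- B-side lemmas ----------

theorem contains_add_ne (s : PySem.Set Int) (a x : Int) (h : x ≠ a) :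
    PySem.Set.contains (PySem.Set.add s a) x = PySem.Set.contains s x := by
  apply bool_ext
  rw [PySem.Set.contains_iff, PySem.Set.contains_iff, PySem.Set.mem_add]
  tauto

theorem pvB_inner_snd_mem (o : Int × Int) (jsps : List (Int × (Int × Int × String)))
    (lab : String) (seen : PySem.Set Int) (x : Int) :
    x ∈ (jsps.foldl (pvB_inner o) (lab, seen)).2 ↔
      x ∈ seen ∨ ∃ jsp ∈ jsps, x = jsp.1 ∧ pvOvl o jsp.2 = true := by
  induction jsps generalizing lab seen with
  | nil => simp
  | cons jsp rest ih =>
    have hcond : (decide (jsp.2.1 < o.2) && decide (o.1 < jsp.2.2.1)) = pvOvl o jsp.2 := rfl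
    simp only [List.foldl_cons, pvB_inner, hcond]
    cases hov : pvOvl o jsp.2 with
    | false =>
      simp only [Bool.false_eq_true, if_false]
      rw [ih]
      simp [hov]
    | true =>
      simp only [if_true]
      rw [ih]
      simp only [PySem.Set.mem_add, List.mem_cons]
      constructor
      · rintro (⟨h | h⟩ | h)
        · exact Or.inl h
        · exact Or.inr ⟨jsp, Or.inl rfl, h, hov⟩
        · rcases h with ⟨j, hj, hx, hov2⟩
          exact Or.inr ⟨j, Or.inr hj, hx, hov2⟩
      · rintro (h | ⟨j, hj | hj, hx, hov2⟩)
        · exact Or.inl (Or.inl h)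
        · subst hj; exact Or.inl (Or.inr hx)
        · exact Or.inr ⟨j, hj, hx, hov2⟩

theorem pvB_inner_fst (o : Int × Int) (jsps : List (Int × (Int × Int × String)))
    (lab : String) (seen : PySem.Set Int)
    (hpw : jsps.Pairwise (fun a b => a.1 ≠ b.1)) :
    (jsps.foldl (pvB_inner o) (lab, seen)).1 =
      jsps.foldl (fun acc jsp => if pvOvl o jsp.2 then
          ((if PySem.Set.contains seen jsp.1 then "I-" else "B-") ++ jsp.2.2.2) else acc) lab := by
  induction jsps generalizing lab seen with
  | nil => rfl
  | cons jsp rest ih =>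
    rcases List.pairwise_cons.1 hpw with ⟨hhead, htail⟩
    have hcond : (decide (jsp.2.1 < o.2) && decide (o.1 < jsp.2.2.1)) = pvOvl o jsp.2 := rfl
    simp only [List.foldl_cons, pvB_inner, hcond]
    cases hov : pvOvl o jsp.2 with
    | false =>
      simp only [Bool.false_eq_true, if_false]
      exact ih _ _ htail
    | true =>
      simp only [if_true]
      rw [ih _ _ htail]
      exact foldl_congr_mem''
        (fun x hx acc => by rw [contains_add_ne _ _ _ (Ne.symm (hhead x hx))]) _

theorem foldl_enumerate_snd {β : Type} (xs : List (Int × Int × String))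
    (g : β → (Int × Int × String) → β) (s : Int) (init : β) :
    (PySem.List.enumerate xs s).foldl (fun acc jsp => g acc jsp.2) init = xs.foldl g init := by
  induction xs generalizing s init with
  | nil => simp [PySem.List.enumerate_nil]
  | cons x xs ih =>
    rw [PySem.List.enumerate_cons]
    simp only [List.foldl_cons]
    exact ih _ _

theorem pairwise_ne_enumerate (xs : List (Int × Int × String)) (s : Int) :
    (PySem.List.enumerate xs s).Pairwise (fun a b => a.1 ≠ b.1) :=
  (PySem.List.pairwise_lt_enumerate ..).imp (fun h => ne_of_lt h)

theorem enumerate_fst_ovl (o : Int × Int) (xs : List (Int × Int × String)) (jsp : Int × (Int × Int × String))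
    (hj : jsp ∈ PySem.List.enumerate xs 0) :
    (∃ jsp' ∈ PySem.List.enumerate xs 0, jsp.1 = jsp'.1 ∧ pvOvl o jsp'.2 = true) ↔
      pvOvl o jsp.2 = true := by
  constructor
  · rintro ⟨jsp', hj', heq, hov⟩
    rcases (PySem.List.mem_enumerate_iff ..).1 hj with ⟨k, hk, rfl⟩
    rcases (PySem.List.mem_enumerate_iff ..).1 hj' with ⟨m, hm, rfl⟩
    simp only at heq ⊢
    have : k = m := by omega
    subst this
    exact hov
  · intro hov
    exact ⟨jsp, hj, rfl, hov⟩

-- the expected token labels: one per offset, tracking the offsets already processed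
def pvMids (spans : List (Int × Int × String)) : List (Int × Int) → List (Int × Int) → List String
  | _, [] => []
  | pre, o :: os => labAt pre o spans :: pvMids spans (pre ++ [o]) os

theorem length_pvMids (spans : List (Int × Int × String)) (os : List (Int × Int)) :
    ∀ pre, (pvMids spans pre os).length = os.length := by
  induction os with
  | nil => intro pre; rfl
  | cons o os ih => intro pre; simp [pvMids, ih]

theorem getElem?_pvMids (spans : List (Int × Int × String)) (os : List (Int × Int)) :
    ∀ (pre : List (Int × Int)) (i : Nat),
    (pvMids spans pre os)[i]? = os[i]?.map (fun o => labAt (pre ++ os.take i) o spans) := by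
  induction os with
  | nil => intro pre i; simp [pvMids]
  | cons o os ih =>
    intro pre i
    cases i with
    | zero => simp [pvMids]
    | succ n =>
      simp only [pvMids, List.getElem?_cons_succ, List.take_succ_cons]
      rw [ih (pre ++ [o]) n]
      simp [List.append_assoc]

theorem foldl_pvB_step (spans : List (Int × Int × String)) (os : List (Int × Int)) :
    ∀ (pre : List (Int × Int)) (seen : PySem.Set Int) (acc : List String),
    (∀ jsp ∈ PySem.List.enumerate spans 0, ((jsp.1 ∈ seen) ↔ ∃ o' ∈ pre, pvOvl o' jsp.2 = true)) →
    (os.foldl (pvB_step spans) (seen, acc)).2 = acc ++ pvMids spans pre os := by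
  induction os with
  | nil => intro pre seen acc _; simp [pvMids]
  | cons o os ih =>
    intro pre seen acc hseen
    simp only [List.foldl_cons, pvB_step]
    have hlab : ((PySem.List.enumerate spans 0).foldl (pvB_inner o) ("O", seen)).1 = labAt pre o spans := by
      rw [pvB_inner_fst o _ _ _ (pairwise_ne_enumerate ..)]
      rw [foldl_congr_mem''
        (g := fun acc jsp => if pvOvl o jsp.2 then
          ((if pre.all (fun o' => !pvOvl o' jsp.2) then "B-" else "I-") ++ jsp.2.2.2) else acc)
        ?hcg]
      · rw [foldl_enumerate_snd spans
          (fun acc sp => if pvOvl o sp then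
            ((if pre.all (fun o' => !pvOvl o' sp) then "B-" else "I-") ++ sp.2.2) else acc) 0 "O"]
        rfl
      · intro jsp hj acc'
        have hc : PySem.Set.contains seen jsp.1 = !(pre.all (fun o' => !pvOvl o' jsp.2)) := by
          apply bool_ext
          rw [PySem.Set.contains_iff, hseen jsp hj]
          cases hall : pre.all (fun o' => !pvOvl o' jsp.2) with
          | true =>
            simp only [Bool.not_true, Bool.false_eq_true, iff_false]
            rintro ⟨o', ho', hov⟩
            have := List.all_eq_true.1 hall o' ho'
            simp [hov] at this
          | false =>
            have hex : ∃ o' ∈ pre, pvOvl o' jsp.2 = true := by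
              rcases List.all_eq_false.1 hall with ⟨o', ho', h⟩
              exact ⟨o', ho', by simpa using h⟩
            simp [hex]
        rw [hc]
        cases hall : pre.all (fun o' => !pvOvl o' jsp.2) <;> simp [hall]
    have hseen' : ∀ jsp ∈ PySem.List.enumerate spans 0,
        ((jsp.1 ∈ ((PySem.List.enumerate spans 0).foldl (pvB_inner o) ("O", seen)).2) ↔
          ∃ o' ∈ pre ++ [o], pvOvl o' jsp.2 = true) := by
      intro jsp hj
      rw [pvB_inner_snd_mem]
      rw [hseen jsp hj, enumerate_fst_ovl o spans jsp hj]
      simp only [List.mem_append, List.mem_singleton]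
      constructor
      · rintro (⟨o', ho', hov⟩ | hov)
        · exact ⟨o', Or.inl ho', hov⟩
        · exact ⟨o, Or.inr rfl, hov⟩
      · rintro ⟨o', ho' | ho', hov⟩
        · exact Or.inl ⟨o', ho', hov⟩
        · subst ho'; exact Or.inr hov
    rw [ih (pre ++ [o]) _ _ hseen']
    rw [hlab]
    simp [pvMids, List.append_assoc]

theorem B_eq_mids (tokens : List String) (offsets : List (Int × Int)) (spans : List (Int × Int × String)) :
    spans_to_bio_alt tokens offsets spans =
      pvMids spans [] (offsets.take tokens.length) ++
        List.replicate (tokens.length - (offsets.take tokens.length).length) "O" := by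
  simp only [spans_to_bio_alt]
  rw [PySem.List.slice_to_natCast]
  rw [foldl_pvB_step spans _ [] PySem.Set.empty []
    (by intro jsp _; simp [PySem.Set.empty])]
  rw [List.nil_append, length_pvMids]

theorem length_B (tokens : List String) (offsets : List (Int × Int)) (spans : List (Int × Int × String)) :
    (spans_to_bio_alt tokens offsets spans).length = tokens.length := by
  rw [B_eq_mids]
  rw [List.length_append, length_pvMids, List.length_replicate, List.length_take]
  omega

theorem getElem?_B (tokens : List String) (offsets : List (Int × Int)) (spans : List (Int × Int × String))
    (i : Nat) (hi : i < tokens.length) :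
    (spans_to_bio_alt tokens offsets spans)[i]? =
      some ((offsets[i]?).elim "O" (fun o => labAt (offsets.take i) o spans)) := by
  rw [B_eq_mids]
  by_cases hio : i < offsets.length
  · have hil : i < (pvMids spans [] (offsets.take tokens.length)).length := by
      rw [length_pvMids, List.length_take]; omega
    rw [List.getElem?_append_left hil]
    rw [getElem?_pvMids]
    have h1 : (offsets.take tokens.length)[i]? = some offsets[i] := by
      rw [List.getElem?_take, if_pos hi, List.getElem?_eq_getElem hio]
    rw [h1]
    have h2 : (offsets.take tokens.length).take i = offsets.take i := by
      rw [List.take_take]; congr 1; omega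
    rw [h2]
    simp [List.getElem?_eq_getElem hio]
  · have hmlen : (pvMids spans [] (offsets.take tokens.length)).length = offsets.length := by
      rw [length_pvMids, List.length_take]; omega
    rw [List.getElem?_append_right (by omega)]
    rw [hmlen]
    have ho : offsets[i]? = none := by rw [List.getElem?_eq_none_iff]; omega
    rw [ho]
    rw [List.getElem?_replicate]
    simp only [Option.elim_none]
    rw [if_pos (by rw [List.length_take]; omega)]

-- ===== VERDICT (by name: the statement is the Claim_ definition above) =====
theorem spans_to_bio_spec : Claim_equal_spans_to_bio := by
  intro tokens offsets spans _ _
  unfold Spec_spans_to_bio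
  apply List.ext_getElem?
  intro i
  by_cases hi : i < tokens.length
  · rw [getElem?_A tokens offsets spans i hi, getElem?_B tokens offsets spans i hi]
  · rw [List.getElem?_eq_none, List.getElem?_eq_none]
    · simpa [length_B] using hi
    · simpa [length_A] using hi
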